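-- pv_equiv track=rewrite | github.com/kohrongying/aoc | 2018/day7.py | remove_workers_from_stack
-- ===== SOURCE A (Python) =====
-- import copy
--
-- def remove_workers_from_stack(workers, stack):
--   temp = copy.deepcopy(stack)
--   for i in stack:
--     for j in workers:
--       if i == j[0]:
--         temp.remove(i)
--   temp.sort()
--   return temp
-- ===== SOURCE B (Python) =====
-- def remove_workers_from_stack(workers, stack):
--   firsts = {j[0] for j in workers}
--   return sorted(x for x in stack if x not in firsts)
-- ===== Notes on version B (the rewrite author's own statement) =====
-- stated objective: simpler
-- what changed: B builds the set of worker-held task names once and does a single filter-then-sort pass, replacing A's nested stack x workers scan with a list.remove (itself a scan) inside the inner loop.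
import Mathlib
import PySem

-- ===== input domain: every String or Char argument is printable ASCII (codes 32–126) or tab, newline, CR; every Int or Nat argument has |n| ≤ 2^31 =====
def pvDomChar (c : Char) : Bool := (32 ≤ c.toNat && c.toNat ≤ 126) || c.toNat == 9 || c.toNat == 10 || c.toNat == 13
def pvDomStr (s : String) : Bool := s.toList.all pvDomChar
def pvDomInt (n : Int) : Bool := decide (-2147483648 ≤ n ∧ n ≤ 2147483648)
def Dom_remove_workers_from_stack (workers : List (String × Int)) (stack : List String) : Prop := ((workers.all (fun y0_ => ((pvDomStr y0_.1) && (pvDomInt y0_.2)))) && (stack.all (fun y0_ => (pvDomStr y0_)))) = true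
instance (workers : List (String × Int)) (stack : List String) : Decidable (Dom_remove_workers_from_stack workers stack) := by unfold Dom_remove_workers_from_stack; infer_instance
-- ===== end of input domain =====

-- B builds the set of worker firsts once and filters the stack in one pass, then sorts,
-- instead of A's nested stack x workers scan with list.remove inside (simpler, one pass).


-- ===== PORT A =====
-- inner 'for j in workers: if i == j[0]: temp.remove(i)' — state is Option (List String), none = ValueError
def rwInner (workers : List (String × Int)) (i : String) (acc : Option (List String)) : Option (List String) :=
  workers.foldl (fun acc j => acc.bind (fun t => if i == j.1 then PySem.List.remove? t i else some t)) acc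

def remove_workers_from_stack (workers : List (String × Int)) (stack : List String) : List String :=
  match stack.foldl (fun acc i => rwInner workers i acc) (some stack) with
  | some t => PySem.List.sorted t (fun x => x) false
  | none => []   -- unreachable under Pre_ (Python raises ValueError here)

-- ===== PORT B =====
def remove_workers_from_stack_alt (workers : List (String × Int)) (stack : List String) : List String :=
  let firsts : PySem.Set String := PySem.Set.ofList (workers.map Prod.fst)
  PySem.List.sorted (stack.filter (fun x => !(PySem.Set.contains firsts x))) (fun x => x) false

-- ===== PRECONDITION & SPEC =====
-- Pre_ excludes exactly the inputs on which Python A raises ValueError: some stack element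
-- equals the first component of two or more workers (temp.remove is called more often than
-- the element occurs).
def Pre_remove_workers_from_stack (workers : List (String × Int)) (stack : List String) : Prop :=
  ∀ x ∈ stack, workers.countP (fun j => x == j.1) ≤ 1
instance (workers : List (String × Int)) (stack : List String) : Decidable (Pre_remove_workers_from_stack workers stack) := by unfold Pre_remove_workers_from_stack; infer_instance

def pvWitness_remove_workers_from_stack : (List (String × Int)) × List String :=
  ([("C", 3), ("E", 7)], ["A", "C", "B", "C"])

def Spec_remove_workers_from_stack (workers : List (String × Int)) (stack : List String) (out : List String) : Prop := out = remove_workers_from_stack_alt workers stack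
instance (workers : List (String × Int)) (stack : List String) (out : List String) : Decidable (Spec_remove_workers_from_stack workers stack out) := by unfold Spec_remove_workers_from_stack; infer_instance

-- ===== CLAIM (what is proved, stated in full; the proofs are below) =====
def Claim_equal_remove_workers_from_stack : Prop := ∀ (workers : List (String × Int)) (stack : List String), Dom_remove_workers_from_stack workers stack → Pre_remove_workers_from_stack workers stack → Spec_remove_workers_from_stack workers stack (remove_workers_from_stack workers stack)


-- ===== LEMMAS AND PROOFS =====

-- the matched predicate: x equals some worker's first component
def rwMatched (workers : List (String × Int)) (x : String) : Bool :=
  workers.countP (fun j => x == j.1) != 0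

lemma rwInner_zero (ws : List (String × Int)) (i : String) (t : List String)
    (h : ws.countP (fun j => i == j.1) = 0) : rwInner ws i (some t) = some t := by
  induction ws with
  | nil => rfl
  | cons j ws ih =>
    simp only [List.countP_cons] at h
    by_cases hij : (i == j.1) = true
    · simp [hij] at h
    · simp only [rwInner, List.foldl_cons] at *
      simp only [Option.bind_some, hij]
      exact ih (by omega)

lemma rwInner_one (ws : List (String × Int)) (i : String) (t : List String)
    (h : ws.countP (fun j => i == j.1) = 1) (hm : i ∈ t) :
    rwInner ws i (some t) = some (t.erase i) := by
  induction ws with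
  | nil => simp at h
  | cons j ws ih =>
    simp only [List.countP_cons] at h
    by_cases hij : (i == j.1) = true
    · simp only [rwInner, List.foldl_cons, Option.bind_some, hij, if_pos]
      rw [PySem.List.remove?_eq_some_erase t i hm]
      exact rwInner_zero ws i (t.erase i) (by rw [if_pos hij] at h; omega)
    · simp only [rwInner, List.foldl_cons, Option.bind_some, hij]
      exact ih (by simp [hij] at h; omega)

lemma rwLoop (ws : List (String × Int)) :
    ∀ (s t : List String),
    (∀ x ∈ s, ws.countP (fun j => x == j.1) ≤ 1) →
    (∀ x, (s.filter (rwMatched ws)).count x ≤ t.count x) →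
    ∃ u, s.foldl (fun acc i => rwInner ws i acc) (some t) = some u ∧
      ∀ x, u.count x = t.count x - (s.filter (rwMatched ws)).count x := by
  intro s
  induction s with
  | nil => intro t _ _; exact ⟨t, rfl, by simp⟩
  | cons i s' ih =>
    intro t hPre hCnt
    by_cases hm : rwMatched ws i = true
    · -- matched: exactly one worker matches, remove one occurrence of i
      have hc1 : ws.countP (fun j => i == j.1) = 1 := by
        have := hPre i (by simp)
        simp only [rwMatched, bne_iff_ne, ne_eq] at hm
        omega
      have hfc : (i :: s').filter (rwMatched ws) = i :: s'.filter (rwMatched ws) := by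
        simp [hm]
      have hit : i ∈ t := by
        have h1 := hCnt i
        rw [hfc] at h1
        simp at h1
        exact List.count_pos_iff.mp (by omega)
      rw [List.foldl_cons, rwInner_one ws i t hc1 hit]
      obtain ⟨u, hu, hcu⟩ := ih (t.erase i)
        (fun x hx => hPre x (by simp [hx]))
        (by
          intro x
          have h1 := hCnt x
          rw [hfc] at h1
          by_cases hxi : x = i
          · subst hxi
            rw [List.count_erase_self]
            simp at h1
            omega
          · rw [List.count_erase_of_ne hxi]
            rw [List.count_cons_of_ne (fun h => hxi h.symm)] at h1
            omega)
      refine ⟨u, hu, ?_⟩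
      intro x
      rw [hcu x, hfc]
      by_cases hxi : x = i
      · subst hxi
        rw [List.count_erase_self]
        have h2 : 1 ≤ t.count x := List.count_pos_iff.mpr hit
        simp
        omega
      · rw [List.count_erase_of_ne hxi]
        have hix : ¬i = x := fun h => hxi h.symm
        simp [hix]
    · -- unmatched: inner loop is a no-op
      have hc0 : ws.countP (fun j => i == j.1) = 0 := by
        simp only [rwMatched, bne_iff_ne, ne_eq, not_not] at hm
        exact hm
      have hfc : (i :: s').filter (rwMatched ws) = s'.filter (rwMatched ws) := by
        simp [hm]
      rw [List.foldl_cons, rwInner_zero ws i t hc0]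
      obtain ⟨u, hu, hcu⟩ := ih t (fun x hx => hPre x (by simp [hx])) (by rw [hfc] at hCnt; exact hCnt)
      exact ⟨u, hu, fun x => by rw [hcu x, hfc]⟩

lemma rwMatched_eq_contains (ws : List (String × Int)) (x : String) :
    PySem.Set.contains (PySem.Set.ofList (ws.map Prod.fst)) x = rwMatched ws x := by
  by_cases h : x ∈ ws.map Prod.fst
  · rw [(PySem.Set.contains_iff _ _).mpr ((PySem.Set.mem_ofList _ _).mpr h)]
    obtain ⟨j, hj, hjx⟩ := List.mem_map.mp h
    have hne : ws.countP (fun j => x == j.1) ≠ 0 :=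
      Nat.pos_iff_ne_zero.mp (List.countP_pos_iff.mpr ⟨j, hj, by simp [hjx]⟩)
    simp [rwMatched, hne]
  · have hc : PySem.Set.contains (PySem.Set.ofList (ws.map Prod.fst)) x = false := by
      rw [← Bool.not_eq_true]
      intro hco
      exact h ((PySem.Set.mem_ofList _ _).mp ((PySem.Set.contains_iff _ _).mp hco))
    rw [hc]
    have : ws.countP (fun j => x == j.1) = 0 := by
      rw [List.countP_eq_zero]
      intro j hj
      simp only [beq_iff_eq]
      intro he
      exact h (List.mem_map.mpr ⟨j, hj, he.symm⟩)
    simp [rwMatched, this]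

-- count in a filtered list: all kept occurrences of x, or none
lemma count_filter_bool {α : Type} [DecidableEq α] (p : α → Bool) (l : List α) (x : α) :
    (l.filter p).count x = if p x then l.count x else 0 := by
  induction l with
  | nil => simp
  | cons a l ih =>
    by_cases hx : a = x
    · subst hx
      by_cases hp : p a = true <;> simp [hp, ih]
    · by_cases hp : p a = true <;>
        simp [hp, ih, hx]

-- ===== VERDICT (by name: the statement is the Claim_ definition above) =====
theorem remove_workers_from_stack_spec : Claim_equal_remove_workers_from_stack := by
  intro workers stack _ hPre
  unfold Spec_remove_workers_from_stack remove_workers_from_stack remove_workers_from_stack_alt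
  obtain ⟨u, hu, hcu⟩ := rwLoop workers stack stack hPre
    (fun x => List.Sublist.count_le x List.filter_sublist)
  rw [hu]
  have hperm : u.Perm (stack.filter (fun x => !(rwMatched workers x))) := by
    rw [List.perm_iff_count]
    intro x
    rw [hcu x, count_filter_bool, count_filter_bool]
    by_cases hm : rwMatched workers x = true <;> simp [hm]
  have hpred : (fun x => !(PySem.Set.contains (PySem.Set.ofList (workers.map Prod.fst)) x))
      = (fun x => !(rwMatched workers x)) := by
    funext x; rw [rwMatched_eq_contains]
  simp only [hpred]
  exact (PySem.List.sorted_eq_sorted_of_perm _ _ _ (fun a b h => h) hperm)
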